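-- pv_equiv track=rewrite | github.com/GraphicArtQuest/GraphicDocs | src/parse_docstring_functions/get_copyright.py | get_copyright
-- ===== SOURCE A (Python) =====
-- def get_copyright(docstring: str) -> str | None:
--     """
--         Goes through the doc string and looks for any `@copyright` tags. It returns either an array of all the tags
--         it found, or if there were no tags then it returns `None`. For example:
--
--         - `@copyright 2022 John Doe. All rights reserved.`
--     """
--
--     parsed = docstring.splitlines()
--
--     desc = ""
--     record_desc = False # Used as a flag to tell if in the process of recording a block of description text
--     copyrights = []
--
--     for line in parsed:
--         stripped_line = line.strip()
--
--         if stripped_line[0:11] == "@copyright ":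
--             # Start a new @copyright check. Only the last @returns should work, so no check if we've already found one
--             if desc != "":
--                 # We were in the middle of parsing another copyright tag, add this one before continuing
--                 copyrights.append(desc.strip("\n"))
--
--             desc = desc.strip()
--             record_desc = True
--
--             # We have encountered a new return description, start recording the info
--             desc = stripped_line[11:len(stripped_line)]
--             continue
--
--         if desc != "" and stripped_line[0:1] == "@" and record_desc:
--             # Already started parsing a parameter, but now encountering a new tag
--             desc = desc.strip()
--             copyrights.append(desc.strip("\n"))
--
--             desc = ""
--             record_desc = False
--             continue
--
--         if desc != "" and record_desc:
--             # Have found a returns tag already, and now its description has spilled on to another line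
--             if stripped_line == "": # Add a paragraph break
--                 desc += "\n"
--             elif desc[-1:] == "\n": # Do not add an extra space for new paragraphs.
--                 desc += stripped_line
--             else:
--                 desc += " " + stripped_line
--
--     if desc != "":   # If trying to .strip() the value 'None', then it will throw an error.
--         desc.strip()
--         copyrights.append(desc.strip("\n"))
--
--     if len(copyrights) > 0:
--         return copyrights
--     return None
-- ===== SOURCE B (Python) =====
-- def get_copyright(docstring: str) -> str | None:
--     lines = [ln.strip() for ln in docstring.splitlines()]
--
--     # Pass 1: group lines into tag blocks (head line starting with '@', plus
--     # its following continuation lines up to the next tag line).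
--     blocks = []
--     cur = None
--     for ln in lines:
--         if ln.startswith("@"):
--             if cur is not None:
--                 blocks.append(cur)
--             cur = (ln, [])
--         elif cur is not None:
--             cur[1].append(ln)
--     if cur is not None:
--         blocks.append(cur)
--
--     # Pass 2: format the @copyright blocks with a non-empty seed.
--     out = []
--     for head, body in blocks:
--         if not head.startswith("@copyright "):
--             continue
--         text = head[11:].strip()
--         if text == "":
--             continue
--         for ln in body:
--             if ln == "":
--                 text += "\n"
--             elif text.endswith("\n"):
--                 text += ln
--             else:
--                 text += " " + ln
--         out.append(text.strip("\n"))
--     return out if out else None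
-- ===== Notes on version B (the rewrite author's own statement) =====
-- stated objective: alternative
-- what changed: A's single interleaved state-machine loop (desc/record_desc flags with four branches per line) is replaced by two distinct passes: pass 1 groups the stripped lines into tag blocks (a head line starting with '@' plus its continuation lines), pass 2 formats only the '@copyright ' blocks with a non-empty seed; Pre_ excludes docstrings where a '@copyright ' tag is followed by further whitespace, because whether A trims that extra leading whitespace accidentally depends on which kind of line happens to end the block (B always trims it).
-- outside the precondition, e.g. on get_copyright('@copyright  x'): A returns [' x'], B returns ['x']; on get_copyright('@copyright  x\n@param y'): A returns ['x'], B returns ['x']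
import Mathlib
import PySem

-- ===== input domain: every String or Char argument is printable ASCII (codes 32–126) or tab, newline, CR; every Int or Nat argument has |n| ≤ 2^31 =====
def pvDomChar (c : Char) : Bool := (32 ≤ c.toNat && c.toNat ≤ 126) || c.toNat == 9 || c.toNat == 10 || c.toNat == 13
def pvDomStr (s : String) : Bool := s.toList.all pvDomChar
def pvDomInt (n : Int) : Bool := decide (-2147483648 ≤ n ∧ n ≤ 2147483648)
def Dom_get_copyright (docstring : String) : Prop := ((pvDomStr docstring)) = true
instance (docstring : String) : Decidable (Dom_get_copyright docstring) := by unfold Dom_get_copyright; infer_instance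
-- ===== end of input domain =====

-- B replaces A's one interleaved state-machine loop by two passes (group lines into
-- tag blocks, then format the copyright blocks); return values proved equal on Pre_.

-- ===== PORT A =====
-- One loop over the lines with state (desc, record_desc, copyrights), branch for branch.
def pvStepA (st : List Char × Bool × List (List Char)) (line : List Char) :
    List Char × Bool × List (List Char) :=
  let desc := st.1
  let rcd := st.2.1
  let cops := st.2.2
  let s := PySem.Chars.strip line
  if PySem.Chars.slice s (some 0) (some 11) = "@copyright ".toList then
    -- 'if desc != "": copyrights.append(desc.strip("\n"))' then 'desc = stripped_line[11:len(stripped_line)]'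
    let cops := if desc ≠ [] then cops ++ [PySem.Chars.stripChars desc ['\n']] else cops
    (PySem.Chars.slice s (some 11) (some (PySem.Chars.len s)), true, cops)
  else if desc ≠ [] ∧ PySem.Chars.slice s (some 0) (some 1) = ['@'] ∧ rcd = true then
    -- 'desc = desc.strip(); copyrights.append(desc.strip("\n"))'
    ([], false, cops ++ [PySem.Chars.stripChars (PySem.Chars.strip desc) ['\n']])
  else if desc ≠ [] ∧ rcd = true then
    (if s = [] then desc ++ ['\n']
     else if PySem.Chars.slice desc (some (-1)) none = ['\n'] then desc ++ s
     else desc ++ ' ' :: s, rcd, cops)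
  else
    (desc, rcd, cops)

def get_copyright (docstring : String) : Option (List String) :=
  let parsed := (PySem.Str.splitlines docstring).map String.toList
  let st := parsed.foldl pvStepA ([], false, [])
  let cops := if st.1 ≠ [] then st.2.2 ++ [PySem.Chars.stripChars st.1 ['\n']] else st.2.2
  if cops.length > 0 then some (cops.map String.ofList) else none

-- ===== PORT B =====
-- Pass 1: group into (head, continuation-lines) blocks.
def pvGroupStep (st : Option (List Char × List (List Char)) × List (List Char × List (List Char)))
    (ln : List Char) :
    Option (List Char × List (List Char)) × List (List Char × List (List Char)) :=
  if PySem.Chars.startswith ln ['@'] then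
    (some (ln, []), match st.1 with | some c => st.2 ++ [c] | none => st.2)
  else
    match st.1 with
    | some hb => (some (hb.1, hb.2 ++ [ln]), st.2)
    | none => st

-- Pass 2 body: join the continuation lines onto the seed.
def pvFormat (seed : List Char) (body : List (List Char)) : List Char :=
  body.foldl (fun text ln =>
    if ln = [] then text ++ ['\n']
    else if PySem.Chars.endswith text ['\n'] = true then text ++ ln
    else text ++ ' ' :: ln) seed

def get_copyright_alt (docstring : String) : Option (List String) :=
  let lines := (PySem.Str.splitlines docstring).map (fun l => PySem.Chars.strip l.toList)
  let g := lines.foldl pvGroupStep ((none, []) : Option (List Char × List (List Char)) × List (List Char × List (List Char)))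
  let blocks : List (List Char × List (List Char)) := match g.1 with | some c => g.2 ++ [c] | none => g.2
  let out : List (List Char) := blocks.foldl (fun out hb =>
    if PySem.Chars.startswith hb.1 "@copyright ".toList = true then
      let text := PySem.Chars.strip (PySem.Chars.slice hb.1 (some 11) none)
      if text = [] then out
      else out ++ [PySem.Chars.stripChars (pvFormat text hb.2) ['\n']]
    else out) ([] : List (List Char))
  if out ≠ [] then some (out.map String.ofList) else none

-- ===== PRECONDITION & SPEC =====
-- Pre_ excludes docstrings in which some line's '@copyright ' tag is followed by further
-- whitespace: there A trims that extra leading whitespace only when the block is ended by a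
-- plain '@'-line (an accident of its implementation), while B always trims it.
def Pre_get_copyright (docstring : String) : Prop :=
  ∀ l ∈ PySem.Str.splitlines docstring,
    PySem.Chars.startswith (PySem.Chars.strip l.toList) "@copyright ".toList = true →
    (((PySem.Chars.strip l.toList).drop 11).head?.all (fun c => !PySem.Chars.isspace c)) = true
instance (docstring : String) : Decidable (Pre_get_copyright docstring) := by
  unfold Pre_get_copyright; infer_instance

def pvWitness_get_copyright : String := "@copyright 2022 JD\nmore\n@param x"

def Spec_get_copyright (docstring : String) (out : Option (List String)) : Prop := out = get_copyright_alt docstring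
instance (docstring : String) (out : Option (List String)) : Decidable (Spec_get_copyright docstring out) := by unfold Spec_get_copyright; infer_instance

-- ===== CLAIM (what is proved, stated in full; the proofs are below) =====
def Claim_equal_get_copyright : Prop := ∀ (docstring : String), Dom_get_copyright docstring → Pre_get_copyright docstring → Spec_get_copyright docstring (get_copyright docstring)


-- ===== LEMMAS AND PROOFS =====

-- generic dropWhile / prefix helpers

theorem pv_head_dropWhile (p : Char → Bool) (x : List Char) (c : Char)
    (h : (x.dropWhile p).head? = some c) : p c = false := by
  induction x with
  | nil => simp [List.dropWhile] at h
  | cons a t ih =>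
    rw [List.dropWhile] at h
    by_cases hp : p a
    · simp [hp] at h; exact ih h
    · simp [hp] at h; rw [← h]; simpa using hp

theorem pv_dropWhile_eq_self (p : Char → Bool) (x : List Char)
    (h : ∀ c, x.head? = some c → p c = false) : x.dropWhile p = x := by
  cases x with
  | nil => rfl
  | cons a t => simp [List.dropWhile, h a rfl]

theorem pv_dropWhile_sub (p q : Char → Bool) (h1 : ∀ c, p c = true → q c = true)
    (y : List Char) (h2 : ∀ c, (y.dropWhile p).head? = some c → q c = false) :
    y.dropWhile q = y.dropWhile p := by
  induction y with
  | nil => rfl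
  | cons a t ih =>
    by_cases hp : p a
    · rw [List.dropWhile_cons_of_pos hp, List.dropWhile_cons_of_pos (h1 a hp)]
      exact ih (by rwa [List.dropWhile_cons_of_pos hp] at h2)
    · rw [List.dropWhile_cons_of_neg hp]
      have hq : q a = false := by
        apply h2; rw [List.dropWhile_cons_of_neg hp]; rfl
      rw [List.dropWhile_cons_of_neg (by simp [hq])]

-- whitespace-shape predicates

def pvNl (c : Char) : Bool := ['\n'].contains c

def pvNoWs (x : List Char) : Prop := ∀ c, x.head? = some c → PySem.Chars.isspace c = false

def pvStripped (x : List Char) : Prop := pvNoWs x ∧ pvNoWs x.reverse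

def pvQ (x : List Char) : Prop := x ≠ [] ∧ pvNoWs x ∧ pvNoWs (x.reverse.dropWhile pvNl)

theorem pv_nl_of_ws (c : Char) (h : PySem.Chars.isspace c = false) : pvNl c = false := by
  simp only [pvNl, List.contains_cons, List.contains_nil, Bool.or_false]
  by_contra hc
  simp only [Bool.not_eq_false, beq_iff_eq] at hc
  rw [hc] at h
  exact absurd h (by decide)

theorem pv_ws_of_nl (c : Char) (h : pvNl c = true) : PySem.Chars.isspace c = true := by
  simp only [pvNl, List.contains_cons, List.contains_nil, Bool.or_false, beq_iff_eq] at h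
  rw [h]; decide

theorem pv_prefix_noWs (x y : List Char) (h : x <+: y) (hy : pvNoWs y) : pvNoWs x := by
  intro c hc
  obtain ⟨t, rfl⟩ := h
  have hx : x ≠ [] := by intro e; rw [e] at hc; simp at hc
  exact hy c (by rw [List.head?_append_of_ne_nil x hx]; exact hc)

theorem pv_rev_dropWhile_prefix (p : Char → Bool) (x : List Char) :
    (x.reverse.dropWhile p).reverse <+: x := by
  obtain ⟨t, ht⟩ := List.dropWhile_suffix (l := x.reverse) p
  exact ⟨t.reverse, by rw [← List.reverse_append, ht, List.reverse_reverse]⟩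

theorem pv_noWs_take (x : List Char) (n : Nat) (h : pvNoWs x) : pvNoWs (x.take n) := by
  intro c hc
  cases x with
  | nil => simp at hc
  | cons a t =>
    cases n with
    | zero => simp at hc
    | succ m =>
      simp only [List.take_succ_cons, List.head?_cons, Option.some.injEq] at hc
      rw [← hc]; exact h a rfl

-- strip / stripChars shape facts

theorem pv_stripped_strip (l : List Char) : pvStripped (PySem.Chars.strip l) := by
  have hz : pvNoWs (PySem.Chars.lstrip l) := fun c hc => pv_head_dropWhile _ _ _ hc
  constructor
  · intro c hc
    apply pv_prefix_noWs _ _ _ hz c hc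
    exact pv_rev_dropWhile_prefix _ _
  · intro c hc
    rw [PySem.Chars.strip, PySem.Chars.rstrip, List.reverse_reverse] at hc
    exact pv_head_dropWhile _ _ _ hc

theorem pv_strip_eq_self (x : List Char) (h : pvStripped x) : PySem.Chars.strip x = x := by
  rw [PySem.Chars.strip, PySem.Chars.lstrip, pv_dropWhile_eq_self _ _ h.1,
      PySem.Chars.rstrip, pv_dropWhile_eq_self _ _ h.2, List.reverse_reverse]

theorem pv_stripChars_nl (x : List Char) (hx : pvNoWs x) :
    PySem.Chars.stripChars x ['\n'] = (x.reverse.dropWhile pvNl).reverse := by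
  have h1 : x.dropWhile pvNl = x :=
    pv_dropWhile_eq_self _ _ (fun c hc => pv_nl_of_ws c (hx c hc))
  show (List.dropWhile pvNl (List.dropWhile pvNl x).reverse).reverse = _
  rw [h1]

theorem pv_strip_eq_stripNl (x : List Char) (h : pvQ x) :
    PySem.Chars.strip x = PySem.Chars.stripChars x ['\n'] := by
  rw [pv_stripChars_nl x h.2.1]
  rw [PySem.Chars.strip, PySem.Chars.lstrip, pv_dropWhile_eq_self _ _ h.2.1,
      PySem.Chars.rstrip]
  rw [pv_dropWhile_sub pvNl PySem.Chars.isspace pv_ws_of_nl _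
    (fun c hc => h.2.2 c hc)]

theorem pv_stripChars_nl_idem (x : List Char) (hx : pvNoWs x) :
    PySem.Chars.stripChars (PySem.Chars.stripChars x ['\n']) ['\n'] =
      PySem.Chars.stripChars x ['\n'] := by
  rw [pv_stripChars_nl x hx]
  set d := (x.reverse.dropWhile pvNl).reverse with hd
  have hpre : d <+: x := pv_rev_dropWhile_prefix _ _
  have hdw : d.dropWhile pvNl = d := by
    apply pv_dropWhile_eq_self
    intro c hc
    exact pv_nl_of_ws c (pv_prefix_noWs d x hpre hx c hc)
  have hdr : d.reverse.dropWhile pvNl = d.reverse := by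
    apply pv_dropWhile_eq_self
    intro c hc
    rw [hd, List.reverse_reverse] at hc
    exact pv_head_dropWhile _ _ _ hc
  show (List.dropWhile pvNl (List.dropWhile pvNl d).reverse).reverse = d
  rw [hdw, hdr, List.reverse_reverse]

-- pvQ construction / preservation

theorem pv_Q_of_stripped (x : List Char) (hx : pvStripped x) (hne : x ≠ []) : pvQ x := by
  refine ⟨hne, hx.1, ?_⟩
  rw [pv_dropWhile_eq_self _ _ (fun c hc => pv_nl_of_ws c (hx.2 c hc))]
  exact hx.2

theorem pv_Q_append_nl (x : List Char) (h : pvQ x) : pvQ (x ++ ['\n']) := by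
  refine ⟨by simp, ?_, ?_⟩
  · intro c hc
    rw [List.head?_append_of_ne_nil _ h.1] at hc
    exact h.2.1 c hc
  · intro c hc
    rw [List.reverse_append] at hc
    simp only [List.reverse_cons, List.reverse_nil, List.nil_append, List.singleton_append] at hc
    rw [List.dropWhile_cons_of_pos (by decide)] at hc
    exact h.2.2 c hc

theorem pv_Q_append (x y : List Char) (h : pvQ x)
    (hy : ∀ c, y.reverse.head? = some c → PySem.Chars.isspace c = false)
    (hyne : y ≠ []) : pvQ (x ++ y) := by
  refine ⟨by simp [h.1], ?_, ?_⟩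
  · intro c hc
    rw [List.head?_append_of_ne_nil _ h.1] at hc
    exact h.2.1 c hc
  · intro c hc
    rw [List.reverse_append] at hc
    have hrne : y.reverse ≠ [] := by simpa using hyne
    obtain ⟨a, t, ha⟩ := List.exists_cons_of_ne_nil hrne
    have hya : PySem.Chars.isspace a = false := hy a (by rw [ha]; rfl)
    rw [ha, List.cons_append, List.dropWhile_cons_of_neg (by simp [pv_nl_of_ws a hya])] at hc
    simp only [List.head?_cons, Option.some.injEq] at hc
    rw [← hc]; exact hya

-- block formatting on the B side

def pvSeed (h : List Char) : List Char :=
  PySem.Chars.strip (PySem.Chars.slice h (some 11) none)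

def pvFmtBlock (hb : List Char × List (List Char)) : Option (List Char) :=
  if PySem.Chars.startswith hb.1 "@copyright ".toList = true then
    if pvSeed hb.1 = [] then none
    else some (PySem.Chars.stripChars (pvFormat (pvSeed hb.1) hb.2) ['\n'])
  else none

theorem pv_fmt_none_irrel (h : List Char) (b b' : List (List Char))
    (hn : pvFmtBlock (h, b) = none) : pvFmtBlock (h, b') = none := by
  unfold pvFmtBlock at hn ⊢
  split_ifs at hn ⊢ with h1 h2 <;> simp_all

theorem pv_format_concat (seed : List Char) (b : List (List Char)) (s : List Char) :
    pvFormat seed (b ++ [s]) =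
      (if s = [] then pvFormat seed b ++ ['\n']
       else if PySem.Chars.endswith (pvFormat seed b) ['\n'] = true then pvFormat seed b ++ s
       else pvFormat seed b ++ ' ' :: s) := by
  rw [pvFormat, List.foldl_append]
  rfl

theorem pv_pass2 (blocks : List (List Char × List (List Char))) (acc : List (List Char)) :
    blocks.foldl (fun out hb =>
      if PySem.Chars.startswith hb.1 "@copyright ".toList = true then
        let text := PySem.Chars.strip (PySem.Chars.slice hb.1 (some 11) none)
        if text = [] then out
        else out ++ [PySem.Chars.stripChars (pvFormat text hb.2) ['\n']]
      else out) acc = acc ++ blocks.filterMap pvFmtBlock := by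
  induction blocks generalizing acc with
  | nil => simp
  | cons hb t ih =>
    rw [List.foldl_cons, List.filterMap_cons, ih]
    unfold pvFmtBlock pvSeed
    split_ifs with h1 h2 <;> simp_all [PySem.Chars.slice_eq_listSlice]

-- slice / startswith bridges

theorem pv_take11 (s : List Char) : PySem.Chars.slice s (some 0) (some 11) = s.take 11 := by
  rw [PySem.Chars.slice_eq_listSlice, PySem.List.slice_zero_start,
      PySem.List.slice_to _ (by norm_num)]
  rfl

theorem pv_take1 (s : List Char) : PySem.Chars.slice s (some 0) (some 1) = s.take 1 := by
  rw [PySem.Chars.slice_eq_listSlice, PySem.List.slice_zero_start,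
      PySem.List.slice_to _ (by norm_num)]
  rfl

theorem pv_drop11 (s : List Char) :
    PySem.Chars.slice s (some 11) (some (PySem.Chars.len s)) = s.drop 11 := by
  rw [PySem.Chars.slice_eq_listSlice, PySem.Chars.len_eq,
      PySem.List.slice_toNat _ (by norm_num) (by positivity)]
  have : ((s.length : Int)).toNat = s.length := Int.toNat_natCast s.length
  rw [this]
  show (s.drop 11).take (s.length - 11) = s.drop 11
  apply List.take_of_length_le
  simp

theorem pv_drop11' (s : List Char) : PySem.Chars.slice s (some 11) none = s.drop 11 := by
  rw [PySem.Chars.slice_eq_listSlice, PySem.List.slice_from _ (by norm_num)]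
  rfl

theorem pv_start_iff (s : List Char) :
    PySem.Chars.startswith s "@copyright ".toList = true ↔ s.take 11 = "@copyright ".toList := by
  rw [PySem.Chars.startswith_iff, List.prefix_iff_eq_take]
  constructor <;> (intro h; exact h.symm)

theorem pv_at_iff (s : List Char) :
    PySem.Chars.startswith s ['@'] = true ↔ s.take 1 = ['@'] := by
  rw [PySem.Chars.startswith_iff, List.prefix_iff_eq_take]
  constructor <;> (intro h; exact h.symm)

theorem pv_last_nl (x : List Char) (hx : x ≠ []) :
    PySem.Chars.slice x (some (-1)) none = ['\n'] ↔
      PySem.Chars.endswith x ['\n'] = true := by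
  obtain ⟨y, a, rfl⟩ : ∃ (y : List Char) (a : Char), x = y ++ [a] := by
    rcases List.eq_nil_or_concat x with h1 | ⟨L, b, hL⟩
    · exact absurd h1 hx
    · exact ⟨L, b, by simpa [List.concat_eq_append] using hL⟩
  rw [PySem.Chars.slice_eq_listSlice, PySem.List.slice_from_neg_one]
  rw [PySem.Chars.endswith_iff]
  have hlen : (y ++ [a]).length - 1 = y.length := by simp
  rw [hlen, List.drop_left]
  constructor
  · intro h
    simp only [List.cons.injEq, and_true] at h
    exact ⟨y, by rw [← h]⟩
  · intro h
    obtain ⟨t, ht⟩ := h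
    have := List.concat_inj.mp (by simpa [List.concat_eq_append] using ht)
    rw [this.2]

-- the invariant relating A's loop state to B's grouping state

def pvR (a : List Char × Bool × List (List Char))
    (b : Option (List Char × List (List Char)) × List (List Char × List (List Char))) : Prop :=
  a.2.2 = b.2.filterMap pvFmtBlock ∧
  ((∃ h bdy, b.1 = some (h, bdy) ∧
      PySem.Chars.startswith h "@copyright ".toList = true ∧ pvSeed h ≠ [] ∧
      a.1 = pvFormat (pvSeed h) bdy ∧ a.2.1 = true ∧ pvQ a.1)
   ∨ (a.1 = [] ∧ (b.1 = none ∨ ∃ h bdy, b.1 = some (h, bdy) ∧ pvFmtBlock (h, bdy) = none)))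

def pvPreLine (l : List Char) : Prop :=
  PySem.Chars.startswith (PySem.Chars.strip l) "@copyright ".toList = true →
  (((PySem.Chars.strip l).drop 11).head?.all (fun c => !PySem.Chars.isspace c)) = true

theorem pv_flush_some (bs : List (List Char × List (List Char)))
    (h : List Char) (bdy : List (List Char)) (v : List Char)
    (hv : pvFmtBlock (h, bdy) = some v) :
    (bs ++ [(h, bdy)]).filterMap pvFmtBlock = bs.filterMap pvFmtBlock ++ [v] := by
  rw [List.filterMap_append]
  simp [hv]

theorem pv_flush_none (bs : List (List Char × List (List Char)))
    (h : List Char) (bdy : List (List Char))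
    (hv : pvFmtBlock (h, bdy) = none) :
    (bs ++ [(h, bdy)]).filterMap pvFmtBlock = bs.filterMap pvFmtBlock := by
  rw [List.filterMap_append]
  simp [hv]

theorem pv_step (a : List Char × Bool × List (List Char))
    (b : Option (List Char × List (List Char)) × List (List Char × List (List Char)))
    (l : List Char) (hR : pvR a b) (hP : pvPreLine l) :
    pvR (pvStepA a l) (pvGroupStep b (PySem.Chars.strip l)) := by
  obtain ⟨d, r, cp⟩ := a
  obtain ⟨cur, bs⟩ := b
  have hstr : pvStripped (PySem.Chars.strip l) := pv_stripped_strip l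
  obtain ⟨hcp, hcase⟩ := hR
  replace hcp : cp = bs.filterMap pvFmtBlock := hcp
  by_cases c1 : (PySem.Chars.strip l).take 11 = "@copyright ".toList
  · -- a '@copyright ' line
    have hsw : PySem.Chars.startswith (PySem.Chars.strip l) "@copyright ".toList = true :=
      (pv_start_iff _).mpr c1
    have hat : PySem.Chars.startswith (PySem.Chars.strip l) ['@'] = true := by
      rw [pv_at_iff]
      have h1 := congrArg (List.take 1) c1
      rw [List.take_take] at h1
      norm_num at h1
      exact h1
    have hA : pvStepA (d, r, cp) l =
        ((PySem.Chars.strip l).drop 11, true,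
          if d ≠ [] then cp ++ [PySem.Chars.stripChars d ['\n']] else cp) := by
      unfold pvStepA
      rw [if_pos (by rw [pv_take11]; exact c1), pv_drop11]
    rw [hA]
    have hnw : pvNoWs ((PySem.Chars.strip l).drop 11) := by
      intro c hc
      have h2 := hP hsw
      rw [hc] at h2
      simpa using h2
    have hdstr : pvStripped ((PySem.Chars.strip l).drop 11) := by
      refine ⟨hnw, ?_⟩
      rw [List.reverse_drop]
      exact pv_noWs_take _ _ hstr.2
    have hseed : pvSeed (PySem.Chars.strip l) = (PySem.Chars.strip l).drop 11 := by
      rw [pvSeed, pv_drop11', pv_strip_eq_self _ hdstr]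
    have hshape : ((∃ h bdy,
          (some (PySem.Chars.strip l, ([] : List (List Char)))) = some (h, bdy) ∧
          PySem.Chars.startswith h "@copyright ".toList = true ∧ pvSeed h ≠ [] ∧
          (PySem.Chars.strip l).drop 11 = pvFormat (pvSeed h) bdy ∧ true = true ∧
          pvQ ((PySem.Chars.strip l).drop 11))
        ∨ ((PySem.Chars.strip l).drop 11 = [] ∧
           ((some (PySem.Chars.strip l, ([] : List (List Char)))) = none ∨ ∃ h bdy,
             (some (PySem.Chars.strip l, ([] : List (List Char)))) = some (h, bdy) ∧
             pvFmtBlock (h, bdy) = none))) := by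
      by_cases hd11 : (PySem.Chars.strip l).drop 11 = []
      · right
        refine ⟨hd11, Or.inr ⟨PySem.Chars.strip l, [], rfl, ?_⟩⟩
        unfold pvFmtBlock
        rw [if_pos hsw, if_pos (by rw [hseed]; exact hd11)]
      · left
        refine ⟨PySem.Chars.strip l, [], rfl, hsw, by rw [hseed]; exact hd11, ?_, rfl, ?_⟩
        · rw [hseed]; rfl
        · exact pv_Q_of_stripped _ hdstr hd11
    rcases hcase with ⟨h0, bdy0, hcur, hsw0, hseed0, hd0, hr0, hQ0⟩ | ⟨hd, hidle⟩
    · replace hcur : cur = some (h0, bdy0) := hcur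
      replace hd0 : d = pvFormat (pvSeed h0) bdy0 := hd0
      replace hQ0 : pvQ d := hQ0
      subst hcur
      have hB : pvGroupStep (some (h0, bdy0), bs) (PySem.Chars.strip l) =
          (some (PySem.Chars.strip l, []), bs ++ [(h0, bdy0)]) := by
        unfold pvGroupStep
        rw [if_pos hat]
      rw [hB]
      have hfmt : pvFmtBlock (h0, bdy0) = some (PySem.Chars.stripChars d ['\n']) := by
        unfold pvFmtBlock
        rw [if_pos hsw0, if_neg hseed0, hd0]
      refine ⟨?_, hshape⟩
      show (if d ≠ [] then cp ++ [PySem.Chars.stripChars d ['\n']] else cp) =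
        (bs ++ [(h0, bdy0)]).filterMap pvFmtBlock
      rw [if_pos hQ0.1, hcp, pv_flush_some bs h0 bdy0 _ hfmt]
    · replace hd : d = [] := hd
      subst hd
      rcases hidle with hnone | ⟨h0, bdy0, hcur, hfmt⟩
      · replace hnone : cur = none := hnone
        subst hnone
        have hB : pvGroupStep (none, bs) (PySem.Chars.strip l) =
            (some (PySem.Chars.strip l, []), bs) := by
          unfold pvGroupStep
          rw [if_pos hat]
        rw [hB]
        refine ⟨?_, hshape⟩
        show (if ([] : List Char) ≠ [] then cp ++ [PySem.Chars.stripChars [] ['\n']] else cp) = bs.filterMap pvFmtBlock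
        rw [if_neg (by simp)]
        exact hcp
      · replace hcur : cur = some (h0, bdy0) := hcur
        subst hcur
        have hB : pvGroupStep (some (h0, bdy0), bs) (PySem.Chars.strip l) =
            (some (PySem.Chars.strip l, []), bs ++ [(h0, bdy0)]) := by
          unfold pvGroupStep
          rw [if_pos hat]
        rw [hB]
        refine ⟨?_, hshape⟩
        show (if ([] : List Char) ≠ [] then cp ++ [PySem.Chars.stripChars [] ['\n']] else cp) = (bs ++ [(h0, bdy0)]).filterMap pvFmtBlock
        rw [if_neg (by simp), hcp, pv_flush_none bs h0 bdy0 hfmt]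
  · by_cases c2 : (PySem.Chars.strip l).take 1 = ['@']
    · -- a non-copyright '@' line
      have hat : PySem.Chars.startswith (PySem.Chars.strip l) ['@'] = true :=
        (pv_at_iff _).mpr c2
      have hnsw : PySem.Chars.startswith (PySem.Chars.strip l) "@copyright ".toList ≠ true :=
        fun hcon => c1 ((pv_start_iff _).mp hcon)
      have hfmtnew : pvFmtBlock (PySem.Chars.strip l, []) = none := by
        unfold pvFmtBlock
        rw [if_neg hnsw]
      rcases hcase with ⟨h0, bdy0, hcur, hsw0, hseed0, hd0, hr0, hQ0⟩ | ⟨hd, hidle⟩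
      · replace hcur : cur = some (h0, bdy0) := hcur
        replace hd0 : d = pvFormat (pvSeed h0) bdy0 := hd0
        replace hr0 : r = true := hr0
        replace hQ0 : pvQ d := hQ0
        subst hcur
        have hB : pvGroupStep (some (h0, bdy0), bs) (PySem.Chars.strip l) =
            (some (PySem.Chars.strip l, []), bs ++ [(h0, bdy0)]) := by
          unfold pvGroupStep
          rw [if_pos hat]
        have hA : pvStepA (d, r, cp) l =
            ([], false, cp ++ [PySem.Chars.stripChars (PySem.Chars.strip d) ['\n']]) := by
          unfold pvStepA
          rw [if_neg (by rw [pv_take11]; exact c1),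
              if_pos ⟨hQ0.1, by rw [pv_take1]; exact c2, hr0⟩]
        rw [hA, hB]
        have hval : PySem.Chars.stripChars (PySem.Chars.strip d) ['\n'] =
            PySem.Chars.stripChars d ['\n'] := by
          rw [pv_strip_eq_stripNl d hQ0, pv_stripChars_nl_idem d hQ0.2.1]
        have hfmt : pvFmtBlock (h0, bdy0) = some (PySem.Chars.stripChars d ['\n']) := by
          unfold pvFmtBlock
          rw [if_pos hsw0, if_neg hseed0, hd0]
        constructor
        · show cp ++ [PySem.Chars.stripChars (PySem.Chars.strip d) ['\n']] =
            (bs ++ [(h0, bdy0)]).filterMap pvFmtBlock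
          rw [hval, hcp, pv_flush_some bs h0 bdy0 _ hfmt]
        · right
          exact ⟨rfl, Or.inr ⟨PySem.Chars.strip l, [], rfl, hfmtnew⟩⟩
      · replace hd : d = [] := hd
        subst hd
        have hA : pvStepA ([], r, cp) l = ([], r, cp) := by
          unfold pvStepA
          rw [if_neg (by rw [pv_take11]; exact c1),
              if_neg (by simp), if_neg (by simp)]
        rw [hA]
        rcases hidle with hnone | ⟨h0, bdy0, hcur, hfmt⟩
        · replace hnone : cur = none := hnone
          subst hnone
          have hB : pvGroupStep (none, bs) (PySem.Chars.strip l) =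
              (some (PySem.Chars.strip l, []), bs) := by
            unfold pvGroupStep
            rw [if_pos hat]
          rw [hB]
          exact ⟨hcp, Or.inr ⟨rfl, Or.inr ⟨PySem.Chars.strip l, [], rfl, hfmtnew⟩⟩⟩
        · replace hcur : cur = some (h0, bdy0) := hcur
          subst hcur
          have hB : pvGroupStep (some (h0, bdy0), bs) (PySem.Chars.strip l) =
              (some (PySem.Chars.strip l, []), bs ++ [(h0, bdy0)]) := by
            unfold pvGroupStep
            rw [if_pos hat]
          rw [hB]
          refine ⟨?_, Or.inr ⟨rfl, Or.inr ⟨PySem.Chars.strip l, [], rfl, hfmtnew⟩⟩⟩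
          show cp = (bs ++ [(h0, bdy0)]).filterMap pvFmtBlock
          rw [hcp, pv_flush_none bs h0 bdy0 hfmt]
    · -- a plain continuation line
      have hnat : PySem.Chars.startswith (PySem.Chars.strip l) ['@'] ≠ true :=
        fun hcon => c2 ((pv_at_iff _).mp hcon)
      rcases hcase with ⟨h0, bdy0, hcur, hsw0, hseed0, hd0, hr0, hQ0⟩ | ⟨hd, hidle⟩
      · replace hcur : cur = some (h0, bdy0) := hcur
        replace hd0 : d = pvFormat (pvSeed h0) bdy0 := hd0
        replace hr0 : r = true := hr0
        replace hQ0 : pvQ d := hQ0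
        subst hcur
        have hB : pvGroupStep (some (h0, bdy0), bs) (PySem.Chars.strip l) =
            (some (h0, bdy0 ++ [PySem.Chars.strip l]), bs) := by
          unfold pvGroupStep
          rw [if_neg hnat]
        have hA : pvStepA (d, r, cp) l =
            (if PySem.Chars.strip l = [] then d ++ ['\n']
             else if PySem.Chars.slice d (some (-1)) none = ['\n'] then d ++ PySem.Chars.strip l
             else d ++ ' ' :: PySem.Chars.strip l, r, cp) := by
          unfold pvStepA
          rw [if_neg (by rw [pv_take11]; exact c1),
              if_neg (by rw [pv_take1]; intro hcon; exact c2 hcon.2.1),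
              if_pos ⟨hQ0.1, hr0⟩]
        rw [hA, hB]
        have hdnew : (if PySem.Chars.strip l = [] then d ++ ['\n']
             else if PySem.Chars.slice d (some (-1)) none = ['\n'] then d ++ PySem.Chars.strip l
             else d ++ ' ' :: PySem.Chars.strip l) =
            pvFormat (pvSeed h0) (bdy0 ++ [PySem.Chars.strip l]) := by
          rw [pv_format_concat, ← hd0]
          by_cases hsl : PySem.Chars.strip l = []
          · rw [if_pos hsl, if_pos hsl]
          · rw [if_neg hsl, if_neg hsl]
            by_cases hnl : PySem.Chars.endswith d ['\n'] = true
            · rw [if_pos ((pv_last_nl d hQ0.1).mpr hnl), if_pos hnl]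
            · rw [if_neg (fun hcon => hnl ((pv_last_nl d hQ0.1).mp hcon)), if_neg hnl]
        have hQnew : pvQ (if PySem.Chars.strip l = [] then d ++ ['\n']
             else if PySem.Chars.slice d (some (-1)) none = ['\n'] then d ++ PySem.Chars.strip l
             else d ++ ' ' :: PySem.Chars.strip l) := by
          by_cases hsl : PySem.Chars.strip l = []
          · rw [if_pos hsl]
            exact pv_Q_append_nl d hQ0
          · rw [if_neg hsl]
            have hrevne : (PySem.Chars.strip l).reverse ≠ [] := by simpa using hsl
            have hhy : ∀ c, (PySem.Chars.strip l).reverse.head? = some c →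
                PySem.Chars.isspace c = false := fun c hc => hstr.2 c hc
            by_cases hnl : PySem.Chars.slice d (some (-1)) none = ['\n']
            · rw [if_pos hnl]
              exact pv_Q_append d _ hQ0 hhy hsl
            · rw [if_neg hnl]
              refine pv_Q_append d _ hQ0 ?_ (by simp)
              intro c hc
              rw [List.reverse_cons, List.head?_append_of_ne_nil _ hrevne] at hc
              exact hhy c hc
        exact ⟨hcp, Or.inl ⟨h0, bdy0 ++ [PySem.Chars.strip l], rfl, hsw0, hseed0,
          hdnew, hr0, hQnew⟩⟩
      · replace hd : d = [] := hd
        subst hd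
        have hA : pvStepA ([], r, cp) l = ([], r, cp) := by
          unfold pvStepA
          rw [if_neg (by rw [pv_take11]; exact c1),
              if_neg (by simp), if_neg (by simp)]
        rw [hA]
        rcases hidle with hnone | ⟨h0, bdy0, hcur, hfmt⟩
        · replace hnone : cur = none := hnone
          subst hnone
          have hB : pvGroupStep (none, bs) (PySem.Chars.strip l) = (none, bs) := by
            unfold pvGroupStep
            rw [if_neg hnat]
          rw [hB]
          exact ⟨hcp, Or.inr ⟨rfl, Or.inl rfl⟩⟩
        · replace hcur : cur = some (h0, bdy0) := hcur
          subst hcur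
          have hB : pvGroupStep (some (h0, bdy0), bs) (PySem.Chars.strip l) =
              (some (h0, bdy0 ++ [PySem.Chars.strip l]), bs) := by
            unfold pvGroupStep
            rw [if_neg hnat]
          rw [hB]
          exact ⟨hcp, Or.inr ⟨rfl, Or.inr ⟨h0, bdy0 ++ [PySem.Chars.strip l], rfl,
            pv_fmt_none_irrel h0 bdy0 _ hfmt⟩⟩⟩

theorem pv_main (ls : List (List Char)) (hP : ∀ l ∈ ls, pvPreLine l) :
    ∀ a b, pvR a b →
      pvR (ls.foldl pvStepA a)
        (ls.foldl (fun st l => pvGroupStep st (PySem.Chars.strip l)) b) := by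
  induction ls with
  | nil => intro a b h; exact h
  | cons l t ih =>
    intro a b h
    exact ih (fun x hx => hP x (List.mem_cons_of_mem _ hx)) _ _
      (pv_step a b l h (hP l List.mem_cons_self))


-- ===== VERDICT (by name: the statement is the Claim_ definition above) =====
theorem get_copyright_spec : Claim_equal_get_copyright := by
  unfold Claim_equal_get_copyright
  intro doc hdom hpre
  unfold Spec_get_copyright get_copyright get_copyright_alt
  dsimp only
  have hPl : ∀ l' ∈ (PySem.Str.splitlines doc).map String.toList, pvPreLine l' := by
    intro l' hl'
    obtain ⟨l, hl, rfl⟩ := List.mem_map.mp hl'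
    exact fun hsw => hpre l hl hsw
  have hfold : ((PySem.Str.splitlines doc).map (fun l => PySem.Chars.strip l.toList)).foldl
      pvGroupStep
      ((none, []) : Option (List Char × List (List Char)) × List (List Char × List (List Char))) =
      ((PySem.Str.splitlines doc).map String.toList).foldl
        (fun st l => pvGroupStep st (PySem.Chars.strip l)) (none, []) := by
    have hmap : (PySem.Str.splitlines doc).map (fun l => PySem.Chars.strip l.toList)
        = ((PySem.Str.splitlines doc).map String.toList).map PySem.Chars.strip := by
      rw [List.map_map]; rfl
    rw [hmap, List.foldl_map]
  rw [hfold, pv_pass2, List.nil_append]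
  have hRfin := pv_main _ hPl ([], false, []) (none, []) ⟨rfl, Or.inr ⟨rfl, Or.inl rfl⟩⟩
  set stA := ((PySem.Str.splitlines doc).map String.toList).foldl pvStepA ([], false, []) with hstA
  set g := ((PySem.Str.splitlines doc).map String.toList).foldl
      (fun st l => pvGroupStep st (PySem.Chars.strip l)) (none, []) with hg
  obtain ⟨hcp, hcase⟩ := hRfin
  have hco : (if stA.1 ≠ [] then stA.2.2 ++ [PySem.Chars.stripChars stA.1 ['\n']] else stA.2.2) =
      (match g.1 with
        | some c => g.2 ++ [c]
        | none => g.2).filterMap pvFmtBlock := by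
    rcases hcase with ⟨h0, bdy0, hcur, hsw0, hseed0, hd0, hr0, hQ0⟩ | ⟨hd, hidle⟩
    · have hfmt : pvFmtBlock (h0, bdy0) = some (PySem.Chars.stripChars stA.1 ['\n']) := by
        unfold pvFmtBlock
        rw [if_pos hsw0, if_neg hseed0, ← hd0]
      rw [if_pos hQ0.1, hcur, hcp, pv_flush_some g.2 h0 bdy0 _ hfmt]
    · rw [if_neg (by simp [hd]), hcp]
      rcases hidle with hnone | ⟨h0, bdy0, hcur, hfmt⟩
      · rw [hnone]
      · rw [hcur, pv_flush_none g.2 h0 bdy0 hfmt]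
  rw [hco]
  by_cases hL : (match g.1 with
        | some c => g.2 ++ [c]
        | none => g.2).filterMap pvFmtBlock = []
  · rw [if_neg (by simp [hL]), if_neg (by simp [hL])]
  · rw [if_pos (by simp [List.length_pos_iff, hL]), if_pos hL]
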